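-- pv_equiv track=rewrite | github.com/benquick123/code-profiling | code/batch-1/vse-naloge-brez-testov/DN6-M-29.py | zberi_se_zacne_z
-- ===== SOURCE A (Python) =====
-- def unikati(s):
--     rez = []
--     for i in s:
--         if i in rez:
--             pass
--         else:
--             rez.append(i)
--     return rez
--
-- def izloci_besedo(beseda):
--     s = ""
--     for c in beseda:
--         if c.isalnum() or c == "-":
--             s += c
--     return s
--
-- def zberi_se_zacne_z(tviti, c):
--     rez = []
--     for tvit in tviti:
--         for beseda in tvit.split(" "):
--             if beseda.startswith(c):
--                 rez.append(izloci_besedo(beseda))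
--                 rez = unikati(rez)
--     return rez
-- ===== SOURCE B (Python) =====
-- def _ocisti(beseda):
--     return "".join(ch for ch in beseda if ch.isalnum() or ch == "-")
--
-- def zberi_se_zacne_z(tviti, c):
--     besede = [_ocisti(beseda)
--               for tvit in tviti
--               for beseda in tvit.split(" ")
--               if beseda.startswith(c)]
--     return list(dict.fromkeys(besede))
-- ===== Notes on version B (the rewrite author's own statement) =====
-- stated objective: simpler
-- what changed: B collects all cleaned qualifying words in a single comprehension pass and deduplicates exactly once at the end with dict.fromkeys, instead of A's re-running the unikati dedup scan after every single append.
import Mathlib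
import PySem

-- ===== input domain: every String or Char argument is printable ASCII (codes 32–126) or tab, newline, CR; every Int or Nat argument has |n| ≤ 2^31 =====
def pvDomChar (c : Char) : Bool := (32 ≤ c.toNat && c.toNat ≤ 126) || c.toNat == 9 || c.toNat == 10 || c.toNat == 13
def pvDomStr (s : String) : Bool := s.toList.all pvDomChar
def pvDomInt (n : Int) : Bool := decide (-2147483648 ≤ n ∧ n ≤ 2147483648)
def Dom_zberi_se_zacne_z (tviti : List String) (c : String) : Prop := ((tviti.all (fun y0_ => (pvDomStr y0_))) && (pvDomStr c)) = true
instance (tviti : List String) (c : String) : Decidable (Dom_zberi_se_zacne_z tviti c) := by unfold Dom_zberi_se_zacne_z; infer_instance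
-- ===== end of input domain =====

-- B collects all cleaned qualifying words in one comprehension-style pass and
-- deduplicates once at the end (dict.fromkeys), instead of re-running unikati
-- after every append; objective: simpler (and avoids the repeated dedup passes).

-- ===== PORT A =====
def unikati (s : List String) : List String :=
  s.foldl (fun rez i => if i ∈ rez then rez else rez ++ [i]) []

def izloci_besedo (beseda : String) : String :=
  String.ofList (beseda.toList.foldl
    (fun s c => if PySem.Chars.isalnum c || c == '-' then s ++ [c] else s) [])

def zberi_se_zacne_z (tviti : List String) (c : String) : List String :=
  tviti.foldl (fun rez tvit =>
    ((PySem.Str.split? tvit " ").getD []).foldl (fun rez beseda =>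
      if PySem.Str.startswith beseda c then unikati (rez ++ [izloci_besedo beseda]) else rez)
      rez) []

-- ===== PORT B =====
def pvOcisti (beseda : String) : String :=
  String.ofList (beseda.toList.filter (fun ch => PySem.Chars.isalnum ch || ch == '-'))

def zberi_se_zacne_z_alt (tviti : List String) (c : String) : List String :=
  PySem.List.dedup (tviti.flatMap (fun tvit =>
    (((PySem.Str.split? tvit " ").getD []).filter
        (fun beseda => PySem.Str.startswith beseda c)).map pvOcisti))

-- ===== PRECONDITION & SPEC =====
def Spec_zberi_se_zacne_z (tviti : List String) (c : String) (out : List String) : Prop := out = zberi_se_zacne_z_alt tviti c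
instance (tviti : List String) (c : String) (out : List String) : Decidable (Spec_zberi_se_zacne_z tviti c out) := by unfold Spec_zberi_se_zacne_z; infer_instance

-- ===== CLAIM (what is proved, stated in full; the proofs are below) =====
def Claim_equal_zberi_se_zacne_z : Prop := ∀ (tviti : List String) (c : String), Dom_zberi_se_zacne_z tviti c → Spec_zberi_se_zacne_z tviti c (zberi_se_zacne_z tviti c)

-- ===== LEMMAS AND PROOFS =====

-- the ordered-dedup step: append x unless already present
def pvAdd (rez : List String) (x : String) : List String :=
  if x ∈ rez then rez else rez ++ [x]

theorem pvAdd_nodup (rez : List String) (x : String) (h : rez.Nodup) : (pvAdd rez x).Nodup := by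
  unfold pvAdd; split_ifs with hx
  · exact h
  · simpa using List.Nodup.append h (by simp) (by simpa using hx)

theorem foldl_pvAdd_of_nodup (l acc : List String) (h : (acc ++ l).Nodup) :
    List.foldl pvAdd acc l = acc ++ l := by
  induction l generalizing acc with
  | nil => simp
  | cons x xs ih =>
    have hx : x ∉ acc := by
      intro hmem
      have := List.disjoint_of_nodup_append h
      exact this hmem (by simp)
    simp only [List.foldl_cons]
    rw [show pvAdd acc x = acc ++ [x] by unfold pvAdd; simp [hx]]
    rw [ih (acc ++ [x]) (by simpa using h)]
    simp

theorem unikati_eq_foldl (s : List String) : unikati s = List.foldl pvAdd [] s := by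
  unfold unikati pvAdd; rfl

theorem unikati_append_singleton (rez : List String) (x : String) (h : rez.Nodup) :
    unikati (rez ++ [x]) = pvAdd rez x := by
  rw [unikati_eq_foldl, List.foldl_append, ← unikati_eq_foldl,
    show unikati rez = rez from by rw [unikati_eq_foldl]; simpa using foldl_pvAdd_of_nodup rez [] (by simpa using h)]
  rfl

theorem foldl_pvAdd_nodup (l acc : List String) (h : acc.Nodup) :
    (List.foldl pvAdd acc l).Nodup := by
  induction l generalizing acc with
  | nil => exact h
  | cons x xs ih => exact ih _ (pvAdd_nodup _ _ h)

-- inner loop of A = fold of pvAdd over the cleaned qualifying tokens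
theorem inner_eq (c : String) (toks : List String) (rez : List String) (h : rez.Nodup) :
    List.foldl (fun rez beseda =>
      if PySem.Str.startswith beseda c then unikati (rez ++ [izloci_besedo beseda]) else rez) rez toks
    = List.foldl pvAdd rez ((toks.filter (fun b => PySem.Str.startswith b c)).map izloci_besedo) := by
  induction toks generalizing rez with
  | nil => rfl
  | cons t ts ih =>
    simp only [List.foldl_cons]
    by_cases hs : PySem.Str.startswith t c
    · rw [if_pos hs, unikati_append_singleton _ _ h, ih _ (pvAdd_nodup _ _ h),
        List.filter_cons, if_pos hs]
      rfl
    · rw [if_neg hs, ih _ h, List.filter_cons, if_neg hs]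

-- outer loop of A = fold of pvAdd over the full flattened word list
theorem outer_eq (c : String) (tviti : List String) (rez : List String) (h : rez.Nodup) :
    List.foldl (fun rez tvit =>
      ((PySem.Str.split? tvit " ").getD []).foldl (fun rez beseda =>
        if PySem.Str.startswith beseda c then unikati (rez ++ [izloci_besedo beseda]) else rez)
        rez) rez tviti
    = List.foldl pvAdd rez (tviti.flatMap (fun tvit =>
        (((PySem.Str.split? tvit " ").getD []).filter (fun b => PySem.Str.startswith b c)).map izloci_besedo)) := by
  induction tviti generalizing rez with
  | nil => rfl
  | cons t ts ih =>
    simp only [List.foldl_cons, List.flatMap_cons, List.foldl_append]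
    rw [show List.foldl _ rez (((PySem.Str.split? t " ").getD [])) = _ from inner_eq c _ rez h]
    exact ih _ (foldl_pvAdd_nodup _ _ h)

theorem izloci_eq_pvOcisti (b : String) : izloci_besedo b = pvOcisti b := by
  unfold izloci_besedo pvOcisti
  rw [PySem.List.foldl_append_if_eq_filter]
  simp

-- ===== VERDICT (by name: the statement is the Claim_ definition above) =====
theorem zberi_se_zacne_z_spec : Claim_equal_zberi_se_zacne_z := by
  intro tviti c _
  unfold Spec_zberi_se_zacne_z zberi_se_zacne_z zberi_se_zacne_z_alt
  rw [PySem.List.dedup_eq_ofList, PySem.Set.ofList_eq_foldl,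
    outer_eq c tviti [] (by simp)]
  rw [funext izloci_eq_pvOcisti]
  apply PySem.List.foldl_congr_mem
  intro acc x _
  simp [pvAdd, PySem.Set.add, PySem.Set.contains]
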